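-- pv_equiv track=rewrite | github.com/Ch0ronomato/automata | dags/integrations/reddit.py | _extract_song_info
-- ===== SOURCE A (Python) =====
-- def _extract_song_info(post_title):
--     song_info = list(map(str.strip, post_title.split(" - ")))
--     for i in range(len(song_info)):
--         piece = song_info[i]
--         for c in "[(":
--             if c in piece:
--                 piece = piece[:piece.index(c)].strip()
--         song_info[i] = piece
--     return dict(zip(["band", "song"], song_info))
-- ===== SOURCE B (Python) =====
-- def _extract_song_info(post_title):
--     result = {}
--     for key, part in zip(("band", "song"), post_title.split(" - ")):
--         kept = []
--         for ch in part:
--             if ch in "[(":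
--                 break
--             kept.append(ch)
--         result[key] = "".join(kept).strip()
--     return result
-- ===== Notes on version B (the rewrite author's own statement) =====
-- stated objective: simpler
-- what changed: Replaces A's strip-map followed by an index-mutation loop (membership test plus .index() rescan per bracket character, with repeated strips) by a single forward scan per part that stops at the first opening bracket, followed by one strip, assembling the result directly from zip(keys, parts).
import Mathlib
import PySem

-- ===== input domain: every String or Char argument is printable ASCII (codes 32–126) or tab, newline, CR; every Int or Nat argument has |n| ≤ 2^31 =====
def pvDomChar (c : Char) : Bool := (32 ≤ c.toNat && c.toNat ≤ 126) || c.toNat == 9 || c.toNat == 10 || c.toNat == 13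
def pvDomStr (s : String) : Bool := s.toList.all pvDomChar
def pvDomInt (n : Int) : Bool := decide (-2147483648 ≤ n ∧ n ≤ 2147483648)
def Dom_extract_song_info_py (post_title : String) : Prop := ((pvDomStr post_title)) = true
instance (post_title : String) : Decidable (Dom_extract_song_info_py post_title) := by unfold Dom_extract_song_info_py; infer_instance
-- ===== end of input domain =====

-- B replaces A's strip-map plus index-mutation loop (with 'in' test and .index() rescan per
-- bracket char) by one forward scan per part that stops at the first opening bracket, plus a
-- single strip; objective: simpler (return value only; A mutates no argument).

-- ===== PORT A =====
-- 'if c in piece: piece = piece[:piece.index(c)].strip()' — for a single-character needle,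
-- 'in' is list membership and .index is the first index (exact); the slice [:k] with 0 ≤ k is take.
def pvCutA (piece : List Char) (c : Char) : List Char :=
  if c ∈ piece then PySem.Chars.strip (piece.take ((PySem.List.index? piece c).getD 0)) else piece

def extract_song_info_py (post_title : String) : List (String × String) :=
  -- " - " is nonempty, so split? always returns some
  let song_info := ((PySem.Chars.split? post_title.toList (" - ".toList)).getD []).map PySem.Chars.strip
  -- for i in range(len(song_info)): indices from range(len) are always in range, so getD [] is exact
  let song_info := (PySem.List.pyRange 0 song_info.length).foldl
    (fun si i =>
      let piece := (PySem.List.pyGet? si i).getD []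
      let piece := pvCutA piece '['
      let piece := pvCutA piece '('
      si.set i.toNat piece) song_info
  -- dict(zip(["band","song"], song_info)): the keys are the two distinct literals, so the dict
  -- is literally the zip as an association list
  List.zip ["band", "song"] (song_info.map String.mk)

-- ===== PORT B =====
-- the inner 'for ch in part: if ch in "[(": break; kept.append(ch)' is takeWhile
def pvCleanB (part : List Char) : List Char :=
  PySem.Chars.strip (part.takeWhile (fun ch => !(ch == '[' || ch == '(')))

def extract_song_info_py_alt (post_title : String) : List (String × String) :=
  -- result[key] = … over zip(("band","song"), parts): distinct fresh keys appended in order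
  (List.zip ["band", "song"] ((PySem.Chars.split? post_title.toList (" - ".toList)).getD [])).map
    (fun kv => (kv.1, String.mk (pvCleanB kv.2)))

-- ===== PRECONDITION & SPEC =====
def Spec_extract_song_info_py (post_title : String) (out : List (String × String)) : Prop := out = extract_song_info_py_alt post_title
instance (post_title : String) (out : List (String × String)) : Decidable (Spec_extract_song_info_py post_title out) := by unfold Spec_extract_song_info_py; infer_instance

-- ===== CLAIM (what is proved, stated in full; the proofs are below) =====
def Claim_equal_extract_song_info_py : Prop := ∀ (post_title : String), Dom_extract_song_info_py post_title → Spec_extract_song_info_py post_title (extract_song_info_py post_title)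

-- ===== LEMMAS AND PROOFS =====

-- all-whitespace helper facts
lemma pv_takeWhile_of_all {q : Char → Bool} {w : List Char} (h : ∀ c ∈ w, q c = true) :
    w.takeWhile q = w := by
  induction w with
  | nil => rfl
  | cons a t ih =>
      have ht := ih fun c hc => h c (by simp [hc])
      simp [List.takeWhile_cons, h a (by simp), ht]

lemma pv_dropWhile_of_all {q : Char → Bool} {w : List Char} (h : ∀ c ∈ w, q c = true) :
    w.dropWhile q = [] := by
  induction w with
  | nil => rfl
  | cons a t ih =>
      have ht := ih fun c hc => h c (by simp [hc])
      simp [List.dropWhile_cons, h a (by simp), ht]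

lemma pv_takeWhile_append_of_all {q : Char → Bool} {w y : List Char} (h : ∀ c ∈ w, q c = true) :
    (w ++ y).takeWhile q = w ++ y.takeWhile q := by
  rw [List.takeWhile_append, pv_takeWhile_of_all h, if_pos rfl]

lemma pv_rstrip_append_ws {a w : List Char} (h : ∀ c ∈ w, PySem.Chars.isspace c = true) :
    PySem.Chars.rstrip (a ++ w) = PySem.Chars.rstrip a := by
  unfold PySem.Chars.rstrip
  rw [List.reverse_append, List.dropWhile_append,
    pv_dropWhile_of_all (by intro c hc; exact h c (by simpa using hc))]
  simp

lemma pv_strip_append_ws {a w : List Char} (h : ∀ c ∈ w, PySem.Chars.isspace c = true) :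
    PySem.Chars.strip (a ++ w) = PySem.Chars.strip a := by
  unfold PySem.Chars.strip PySem.Chars.lstrip
  rw [List.dropWhile_append]
  by_cases he : (a.dropWhile PySem.Chars.isspace).isEmpty
  · rw [if_pos he, pv_dropWhile_of_all h]
    rw [List.isEmpty_iff.mp he]
  · rw [if_neg he, pv_rstrip_append_ws h]

lemma pv_strip_prepend_ws {a w : List Char} (h : ∀ c ∈ w, PySem.Chars.isspace c = true) :
    PySem.Chars.strip (w ++ a) = PySem.Chars.strip a := by
  unfold PySem.Chars.strip PySem.Chars.lstrip
  rw [List.dropWhile_append, pv_dropWhile_of_all h]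
  simp

-- strip is idempotent
lemma pv_dropWhile_idem {q : Char → Bool} (l : List Char) :
    (l.dropWhile q).dropWhile q = l.dropWhile q := by
  induction l with
  | nil => rfl
  | cons a t ih =>
      by_cases h : q a
      · simpa [List.dropWhile_cons, h] using ih
      · simp [List.dropWhile_cons, h]

lemma pv_rstrip_decomp (t : List Char) :
    t = PySem.Chars.rstrip t ++ (t.reverse.takeWhile PySem.Chars.isspace).reverse ∧
      (∀ c ∈ (t.reverse.takeWhile PySem.Chars.isspace).reverse, PySem.Chars.isspace c = true) := by
  constructor
  · unfold PySem.Chars.rstrip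
    rw [← List.reverse_append, List.takeWhile_append_dropWhile, List.reverse_reverse]
  · intro c hc
    exact List.mem_takeWhile_imp (by simpa using hc)

lemma pv_rstrip_idem (t : List Char) :
    PySem.Chars.rstrip (PySem.Chars.rstrip t) = PySem.Chars.rstrip t := by
  unfold PySem.Chars.rstrip
  rw [List.reverse_reverse, pv_dropWhile_idem]

lemma pv_strip_idem (s : List Char) :
    PySem.Chars.strip (PySem.Chars.strip s) = PySem.Chars.strip s := by
  unfold PySem.Chars.strip
  set y := PySem.Chars.lstrip s with hy
  obtain ⟨hdec, hws⟩ := pv_rstrip_decomp y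
  set w1 := (y.reverse.takeWhile PySem.Chars.isspace).reverse with hw1
  have hny : y.dropWhile PySem.Chars.isspace = y := by
    rw [hy]; unfold PySem.Chars.lstrip; exact pv_dropWhile_idem s
  have hl : PySem.Chars.lstrip (PySem.Chars.rstrip y) = PySem.Chars.rstrip y := by
    unfold PySem.Chars.lstrip
    cases hr : PySem.Chars.rstrip y with
    | nil => rfl
    | cons a t =>
        by_cases ha : PySem.Chars.isspace a
        · exfalso
          have hy2 : List.dropWhile PySem.Chars.isspace (a :: (t ++ w1)) = a :: (t ++ w1) := by
            have h' := hny
            rw [hdec, hr] at h'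
            simpa using h'
          rw [List.dropWhile_cons, if_pos ha] at hy2
          have hle := List.length_dropWhile_le PySem.Chars.isspace (t ++ w1)
          have hlen := congrArg List.length hy2
          rw [List.length_cons] at hlen
          omega
        · simp [List.dropWhile_cons, ha]
  rw [hl, pv_rstrip_idem]

-- piece[:piece.index(c)] = takeWhile (· != c) when c ∈ piece
lemma pv_take_index {s : List Char} {c : Char} (h : c ∈ s) :
    s.take ((PySem.List.index? s c).getD 0) = s.takeWhile (fun a => a != c) := by
  induction s with
  | nil => cases h
  | cons a t ih =>
      by_cases hac : a = c
      · subst hac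
        rw [PySem.List.index?_cons_self]
        simp [List.takeWhile_cons]
      · have hct : c ∈ t := by cases h with
          | head => exact absurd rfl hac
          | tail _ h' => exact h'
        rw [PySem.List.index?_cons_of_ne t hac]
        have hs : (PySem.List.index? t c).isSome := (PySem.List.index?_isSome_iff t c).mpr hct
        cases hk : PySem.List.index? t c with
        | none => rw [hk] at hs; cases hs
        | some k =>
            simp only [Option.map_some, Option.getD_some, List.take_succ_cons,
              List.takeWhile_cons]
            rw [hk] at ih
            simp [bne, hac]
            simpa using ih hct

lemma pv_takeWhile_ne_of_not_mem {s : List Char} {c : Char} (h : c ∉ s) :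
    s.takeWhile (fun a => a != c) = s :=
  pv_takeWhile_of_all (by intro x hx; simp [bne]; rintro rfl; exact h hx)

-- MASTER LEMMA: stripping commutes past a takeWhile whose predicate keeps all whitespace
lemma pv_master {p : Char → Bool} (hp : ∀ c, PySem.Chars.isspace c = true → p c = true)
    (x : List Char) :
    PySem.Chars.strip ((PySem.Chars.strip x).takeWhile p) =
      PySem.Chars.strip (x.takeWhile p) := by
  -- x = w0 ++ y with w0 all whitespace, y = lstrip x
  have hx : x = x.takeWhile PySem.Chars.isspace ++ PySem.Chars.lstrip x := by
    unfold PySem.Chars.lstrip; rw [List.takeWhile_append_dropWhile]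
  set w0 := x.takeWhile PySem.Chars.isspace with hw0
  set y := PySem.Chars.lstrip x with hy
  have hw0ws : ∀ c ∈ w0, PySem.Chars.isspace c = true := fun c hc =>
    List.mem_takeWhile_imp hc
  have hrhs : PySem.Chars.strip (x.takeWhile p) = PySem.Chars.strip (y.takeWhile p) := by
    conv_lhs => rw [hx]
    rw [pv_takeWhile_append_of_all (fun c hc => hp c (hw0ws c hc))]
    exact pv_strip_prepend_ws hw0ws
  rw [hrhs]
  -- strip x = rstrip y; y = rstrip y ++ w1 with w1 all whitespace
  have hsx : PySem.Chars.strip x = PySem.Chars.rstrip y := rfl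
  obtain ⟨hdec, hw1ws⟩ := pv_rstrip_decomp y
  rw [hsx]
  set r := PySem.Chars.rstrip y with hr
  set w1 := (y.reverse.takeWhile PySem.Chars.isspace).reverse with hw1
  conv_rhs => rw [hdec]
  rw [List.takeWhile_append]
  by_cases hlen : (r.takeWhile p).length = r.length
  · have hrt : r.takeWhile p = r :=
      (List.takeWhile_prefix p).eq_of_length hlen
    rw [if_pos hlen, hrt]
    rw [pv_strip_append_ws (fun c hc => hw1ws c ((List.takeWhile_prefix p).subset hc))]
  · rw [if_neg hlen]

-- characterisation of one A-side cut, for an already-stripped piece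
lemma pv_cutA_eq {z : List Char} {c : Char} (hc : PySem.Chars.isspace c = false) :
    pvCutA (PySem.Chars.strip z) c =
      PySem.Chars.strip ((PySem.Chars.strip z).takeWhile (fun a => a != c)) := by
  unfold pvCutA
  by_cases h : c ∈ PySem.Chars.strip z
  · rw [if_pos h, pv_take_index h]
  · rw [if_neg h, pv_takeWhile_ne_of_not_mem h, pv_strip_idem]

lemma pv_ws_ne {c0 : Char} (h0 : PySem.Chars.isspace c0 = false) :
    ∀ c, PySem.Chars.isspace c = true → (c != c0) = true := by
  intro c h
  by_cases hc : c = c0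
  · rw [hc] at h; rw [h] at h0; cases h0
  · simp [bne, hc]

-- the two cleaners agree on every part
lemma pv_clean_eq (p : List Char) :
    pvCutA (pvCutA (PySem.Chars.strip p) '[') '(' = pvCleanB p := by
  have h1 : PySem.Chars.isspace '[' = false := by decide
  have h2 : PySem.Chars.isspace '(' = false := by decide
  rw [pv_cutA_eq h1, pv_master (pv_ws_ne h1) p,
    pv_cutA_eq (z := List.takeWhile (fun a => a != '[') p) h2,
    pv_master (pv_ws_ne h2), List.takeWhile_takeWhile]
  have hpred : (fun a : Char => decide ((a != '(') = true ∧ (a != '[') = true)) =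
      (fun ch : Char => !(ch == '[' || ch == '(')) := by
    funext c
    by_cases e1 : c = '[' <;> by_cases e2 : c = '(' <;> simp [e1, e2]
  rw [hpred]
  rfl

-- the index-mutation loop is a map
lemma pv_pyRange_nil (a : Int) : PySem.List.pyRange a a = [] := by
  simp [PySem.List.pyRange]

lemma pv_loop_inv (todo done : List (List Char)) :
    (PySem.List.pyRange (done.length) ((done.length : Int) + todo.length)).foldl
      (fun si i => si.set i.toNat
        (pvCutA (pvCutA ((PySem.List.pyGet? si i).getD []) '[') '('))
      (done.map (fun z => pvCutA (pvCutA z '[') '(') ++ todo) =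
    (done ++ todo).map (fun z => pvCutA (pvCutA z '[') '(') := by
  induction todo generalizing done with
  | nil => simpa using pv_pyRange_nil (done.length)
  | cons h t ih =>
      have hlt : (done.length : Int) < (done.length : Int) + (h :: t).length := by
        simp only [List.length_cons]
        omega
      rw [PySem.List.pyRange_one_cons hlt, List.foldl_cons]
      have hget : (PySem.List.pyGet?
          (done.map (fun z => pvCutA (pvCutA z '[') '(') ++ h :: t)
          ((done.length : Int))).getD [] = h := by
        rw [PySem.List.pyGet?_natCast]
        rw [List.getElem?_append_right (by simp)]
        simp
      have hset : (done.map (fun z => pvCutA (pvCutA z '[') '(') ++ h :: t).set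
          ((done.length : Int)).toNat (pvCutA (pvCutA h '[') '(') =
          (done ++ [h]).map (fun z => pvCutA (pvCutA z '[') '(') ++ t := by
        rw [Int.toNat_natCast, List.set_append]
        simp
      rw [hget, hset]
      have this1 := ih (done ++ [h])
      have harith : ((done ++ [h]).length : Int) = (done.length : Int) + 1 := by
        simp
      rw [harith] at this1
      have hstop : (done.length : Int) + 1 + (t.length : Int) =
          (done.length : Int) + ((h :: t).length : Int) := by
        simp only [List.length_cons]
        push_cast
        try ring
      rw [hstop] at this1
      rw [this1]
      simp

-- ===== VERDICT (by name: the statement is the Claim_ definition above) =====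
theorem extract_song_info_py_spec : Claim_equal_extract_song_info_py := by
  intro post_title _
  unfold Spec_extract_song_info_py extract_song_info_py extract_song_info_py_alt
  set parts := (PySem.Chars.split? post_title.toList (" - ".toList)).getD [] with hparts
  simp only []
  have hloop := pv_loop_inv (parts.map PySem.Chars.strip) []
  simp only [List.length_nil, List.nil_append, List.map_nil, Nat.cast_zero, zero_add] at hloop
  rw [hloop]
  rw [List.map_map, List.map_map]
  have hfun : (String.mk ∘ fun z => pvCutA (pvCutA z '[') '(') ∘ PySem.Chars.strip =
      fun p => String.mk (pvCleanB p) := by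
    funext p
    simp only [Function.comp]
    rw [pv_clean_eq]
  rw [hfun]
  have : (fun p => String.mk (pvCleanB p)) = fun p => (Prod.map id (fun p => String.mk (pvCleanB p)) ((), p)).2 := rfl
  rw [List.zip_map_right]
  rfl
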